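-- pv_equiv track=rewrite | github.com/EugeniuZ/Advent-of-Code-2018 | 12/solution.py | _adjust_extremes
-- ===== SOURCE A (Python) =====
-- def _adjust_extremes(n_left, garden, n_right):
--     while garden[0:5] != ['.', '.', '.', '.', '.']:
--         garden.insert(0, '.')
--         n_left += 1
--
--     while garden[-5:] != ['.', '.', '.', '.', '.']:
--         garden.append('.')
--         n_right += 1
--
--     return n_left, garden, n_right
-- ===== SOURCE B (Python) =====
-- def _adjust_extremes(n_left, garden, n_right):
--     lead = next((i for i, p in enumerate(garden) if p != '.'), len(garden))
--     need = max(0, 5 - lead)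
--     garden[:0] = ['.'] * need
--     n_left += need
--     trail = next((i for i, p in enumerate(reversed(garden)) if p != '.'), len(garden))
--     need = max(0, 5 - trail)
--     garden += ['.'] * need
--     n_right += need
--     return n_left, garden, n_right
-- ===== Notes on version B (the rewrite author's own statement) =====
-- stated objective: simpler
-- what changed: Instead of repeatedly comparing 5-element slices and inserting/appending one dot per loop iteration, B counts the leading run of '.' (and, after the left splice, the trailing run) once and splices/extends all needed dots in a single in-place operation per side.
import Mathlib
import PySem

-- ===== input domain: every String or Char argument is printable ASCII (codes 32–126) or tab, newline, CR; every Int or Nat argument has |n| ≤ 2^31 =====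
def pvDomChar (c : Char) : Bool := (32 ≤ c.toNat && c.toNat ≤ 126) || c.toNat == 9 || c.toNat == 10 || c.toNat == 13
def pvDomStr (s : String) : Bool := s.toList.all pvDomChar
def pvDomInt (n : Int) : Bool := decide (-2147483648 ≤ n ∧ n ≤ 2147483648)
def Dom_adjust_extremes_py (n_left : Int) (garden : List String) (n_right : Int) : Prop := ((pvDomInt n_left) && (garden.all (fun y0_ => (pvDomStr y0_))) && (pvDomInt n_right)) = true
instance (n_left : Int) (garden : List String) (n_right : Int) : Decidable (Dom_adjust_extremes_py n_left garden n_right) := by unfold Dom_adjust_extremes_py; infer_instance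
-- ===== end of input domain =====

-- B replaces A's insert/append-one-dot-at-a-time loops by counting each run of '.' once
-- and splicing all needed dots in a single operation per side (objective: simpler).
-- Both A and B mutate `garden` in place in Python; the equivalence proved here is about the return value.

-- length of the leading run of "." (= first index whose element is not ".", defaulting to the length)
def pvRun : List String → Nat
  | [] => 0
  | x :: xs => if x = "." then pvRun xs + 1 else 0

def pvDots5 : List String := [".", ".", ".", ".", "."]

theorem pvRun_cons_dot (g : List String) : pvRun ("." :: g) = pvRun g + 1 := by
  simp [pvRun]

-- take k g is k dots exactly when the leading run has length ≥ k (used for termination and the loop conditions)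
theorem pvTake_eq_replicate_iff : ∀ (k : Nat) (g : List String),
    List.take k g = List.replicate k "." ↔ k ≤ pvRun g := by
  intro k
  induction k with
  | zero => intro g; simp
  | succ k ih =>
    intro g
    cases g with
    | nil =>
        simp [pvRun, List.replicate_succ]
    | cons x xs =>
        by_cases hx : x = "."
        · subst hx
          simp [List.replicate_succ, pvRun_cons_dot, ih xs]
        · simp [List.replicate_succ, pvRun, hx]

-- garden[0:5] == ['.']*5  ⟺  5 ≤ pvRun garden
theorem pvCondL (g : List String) :
    PySem.List.slice g (some 0) (some 5) = pvDots5 ↔ 5 ≤ pvRun g := by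
  have h5 : PySem.List.slice g (some 0) (some 5) = g.take 5 := by
    rw [PySem.List.slice_zero_start]
    exact_mod_cast PySem.List.slice_to_natCast g 5
  rw [h5]
  have : pvDots5 = List.replicate 5 "." := by decide
  rw [this]
  exact pvTake_eq_replicate_iff 5 g

-- garden[-5:] == ['.']*5  ⟺  5 ≤ pvRun garden.reverse
theorem pvCondR (g : List String) :
    PySem.List.slice g (some (-5)) none = pvDots5 ↔ 5 ≤ pvRun g.reverse := by
  have h5 : PySem.List.slice g (some (-5)) none = g.drop (g.length - 5) := by
    exact PySem.List.slice_from_neg_ofNat g 5 (by omega)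
  rw [h5]
  have hrev : g.drop (g.length - 5) = pvDots5 ↔ (g.drop (g.length - 5)).reverse = pvDots5 := by
    constructor
    · intro h; rw [h]; decide
    · intro h
      have := congrArg List.reverse h
      simpa using this.trans (by decide)
  rw [hrev, List.reverse_drop]
  by_cases hlen : 5 ≤ g.length
  · have : g.length - (g.length - 5) = 5 := by omega
    rw [this]
    have : pvDots5 = List.replicate 5 "." := by decide
    rw [this]
    simpa using pvTake_eq_replicate_iff 5 g.reverse
  · have : g.length - (g.length - 5) = g.length := by omega
    rw [this, List.take_of_length_le (by simp)]
    constructor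
    · intro h
      have := congrArg List.length h
      simp [pvDots5] at this
      omega
    · intro h
      exfalso
      have hle : pvRun g.reverse ≤ g.reverse.length := by
        induction g.reverse with
        | nil => simp [pvRun]
        | cons x xs ih => by_cases hx : x = "." <;> simp [pvRun, hx]; omega
      simp at hle
      omega

-- ===== PORT A =====
-- while garden[0:5] != ['.']*5: garden.insert(0, '.'); n_left += 1
def pvPadLeftA (garden : List String) (n : Int) : List String × Int :=
  if PySem.List.slice garden (some 0) (some 5) ≠ pvDots5 then
    pvPadLeftA (PySem.List.insert garden 0 "." ) (n + 1)
  else (garden, n)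
  termination_by 5 - pvRun garden
  decreasing_by
    have hlt : pvRun garden < 5 := by
      by_contra hge
      exact (by assumption : _ ≠ pvDots5) ((pvCondL garden).2 (by omega))
    simp [PySem.List.insert_zero, pvRun_cons_dot]
    omega

-- while garden[-5:] != ['.']*5: garden.append('.'); n_right += 1
def pvPadRightA (garden : List String) (n : Int) : List String × Int :=
  if PySem.List.slice garden (some (-5)) none ≠ pvDots5 then
    pvPadRightA (garden ++ ["."]) (n + 1)
  else (garden, n)
  termination_by 5 - pvRun garden.reverse
  decreasing_by
    have hlt : pvRun garden.reverse < 5 := by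
      by_contra hge
      exact (by assumption : _ ≠ pvDots5) ((pvCondR garden).2 (by omega))
    simp [pvRun_cons_dot]
    omega

def adjust_extremes_py (n_left : Int) (garden : List String) (n_right : Int) : Int × List String × Int :=
  let p := pvPadLeftA garden n_left
  let q := pvPadRightA p.1 n_right
  (p.2, q.1, q.2)

-- ===== PORT B =====
-- lead = first index of a non-'.' plant (default len) = pvRun; need = max(0, 5 - lead) is Nat
-- truncated subtraction; garden[:0] = ['.']*need splices the dots on in one step, then the same
-- on the reversed list for the right end.
def adjust_extremes_py_alt (n_left : Int) (garden : List String) (n_right : Int) : Int × List String × Int :=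
  let lead := pvRun garden
  let needL : Nat := 5 - lead            -- max(0, 5 - lead)
  let g1 := List.replicate needL "." ++ garden
  let trail := pvRun g1.reverse
  let needR : Nat := 5 - trail           -- max(0, 5 - trail)
  let g2 := g1 ++ List.replicate needR "."
  (n_left + needL, g2, n_right + needR)

-- ===== PRECONDITION & SPEC =====
def Spec_adjust_extremes_py (n_left : Int) (garden : List String) (n_right : Int) (out : Int × List String × Int) : Prop := out = adjust_extremes_py_alt n_left garden n_right
instance (n_left : Int) (garden : List String) (n_right : Int) (out : Int × List String × Int) : Decidable (Spec_adjust_extremes_py n_left garden n_right out) := by unfold Spec_adjust_extremes_py; infer_instance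

-- ===== CLAIM (what is proved, stated in full; the proofs are below) =====
def Claim_equal_adjust_extremes_py : Prop := ∀ (n_left : Int) (garden : List String) (n_right : Int), Dom_adjust_extremes_py n_left garden n_right → Spec_adjust_extremes_py n_left garden n_right (adjust_extremes_py n_left garden n_right)

-- ===== LEMMAS AND PROOFS =====

theorem pvPadLeftA_eq : ∀ (k : Nat) (g : List String) (n : Int), 5 - pvRun g = k →
    pvPadLeftA g n = (List.replicate k "." ++ g, n + k) := by
  intro k
  induction k with
  | zero =>
      intro g n hk
      rw [pvPadLeftA, if_neg]
      · simp
      · simp only [not_not]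
        exact (pvCondL g).2 (by omega)
  | succ k ih =>
      intro g n hk
      have hlt : pvRun g < 5 := by omega
      rw [pvPadLeftA, if_pos]
      · rw [PySem.List.insert_zero, ih ("." :: g) (n + 1) (by rw [pvRun_cons_dot]; omega)]
        simp only [Prod.mk.injEq]
        refine ⟨?_, ?_⟩
        · rw [List.replicate_succ' (n := k)]
          simp
        · push_cast; ring
      · intro h
        exact absurd ((pvCondL g).1 h) (by omega)

theorem pvPadRightA_eq : ∀ (k : Nat) (g : List String) (n : Int), 5 - pvRun g.reverse = k →
    pvPadRightA g n = (g ++ List.replicate k ".", n + k) := by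
  intro k
  induction k with
  | zero =>
      intro g n hk
      rw [pvPadRightA, if_neg]
      · simp
      · simp only [not_not]
        exact (pvCondR g).2 (by omega)
  | succ k ih =>
      intro g n hk
      have hlt : pvRun g.reverse < 5 := by omega
      rw [pvPadRightA, if_pos]
      · rw [ih (g ++ ["."]) (n + 1) (by simp [pvRun_cons_dot]; omega)]
        simp only [Prod.mk.injEq]
        refine ⟨?_, ?_⟩
        · rw [List.replicate_succ (n := k)]
          simp
        · push_cast; ring
      · intro h
        exact absurd ((pvCondR g).1 h) (by omega)

-- ===== VERDICT (by name: the statement is the Claim_ definition above) =====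
theorem adjust_extremes_py_spec : Claim_equal_adjust_extremes_py := by
  intro n_left garden n_right _
  unfold Spec_adjust_extremes_py
  simp only [adjust_extremes_py, adjust_extremes_py_alt,
    pvPadLeftA_eq (5 - pvRun garden) garden n_left rfl,
    pvPadRightA_eq (5 - pvRun (List.replicate (5 - pvRun garden) "." ++ garden).reverse)
      (List.replicate (5 - pvRun garden) "." ++ garden) n_right rfl]
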